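-- pv_equiv track=rewrite | github.com/dmh-cs/wp-preprocessing-el | src/iobes.py | _label_iobes
-- ===== SOURCE A (Python) =====
-- def _label_iobes(mention_spans, token_span):
--   [token_start, token_end] = token_span
--   if any([token_start == mention_start and token_end == mention_end for mention_start, mention_end in mention_spans]):
--     return 'S'
--   elif any([token_start == mention_start for mention_start, _ in mention_spans]):
--     return 'B'
--   elif any([token_end == mention_end for _, mention_end in mention_spans]):
--     return 'E'
--   elif any([token_start > mention_start and token_end < mention_end for mention_start, mention_end in mention_spans]):
--     return 'I'
--   else:
--     return 'O'
-- ===== SOURCE B (Python) =====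
-- def _label_iobes(mention_spans, token_span):
--   [token_start, token_end] = token_span
--   found_S = found_B = found_E = found_I = False
--   for mention_start, mention_end in mention_spans:
--     found_S = found_S or (token_start == mention_start and token_end == mention_end)
--     found_B = found_B or token_start == mention_start
--     found_E = found_E or token_end == mention_end
--     found_I = found_I or (token_start > mention_start and token_end < mention_end)
--   if found_S:
--     return 'S'
--   elif found_B:
--     return 'B'
--   elif found_E:
--     return 'E'
--   elif found_I:
--     return 'I'
--   else:
--     return 'O'
-- ===== Notes on version B (the rewrite author's own statement) =====
-- stated objective: simpler
-- what changed: Replaces four separate short-circuiting any(...) scans over mention_spans by a single pass that accumulates four boolean flags, then picks the label by the same priority order.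
import Mathlib
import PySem

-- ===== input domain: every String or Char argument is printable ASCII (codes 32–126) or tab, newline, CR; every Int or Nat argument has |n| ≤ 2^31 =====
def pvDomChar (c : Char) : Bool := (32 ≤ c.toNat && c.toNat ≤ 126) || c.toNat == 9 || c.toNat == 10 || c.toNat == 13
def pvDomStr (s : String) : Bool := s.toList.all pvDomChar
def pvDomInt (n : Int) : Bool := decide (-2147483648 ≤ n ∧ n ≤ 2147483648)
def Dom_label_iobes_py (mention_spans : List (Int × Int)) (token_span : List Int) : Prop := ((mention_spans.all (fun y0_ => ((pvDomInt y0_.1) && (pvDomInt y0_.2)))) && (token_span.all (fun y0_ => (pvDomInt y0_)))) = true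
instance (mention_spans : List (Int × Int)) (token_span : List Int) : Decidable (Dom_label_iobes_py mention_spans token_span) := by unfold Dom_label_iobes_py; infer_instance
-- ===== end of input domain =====

-- B replaces A's four short-circuiting any(...) scans with one pass accumulating four boolean flags (simpler, single traversal).


-- ===== PORT A =====
def label_iobes_py (mention_spans : List (Int × Int)) (token_span : List Int) : String :=
  match token_span with
  | [token_start, token_end] =>
    if mention_spans.any (fun p => token_start == p.1 && token_end == p.2) then "S"
    else if mention_spans.any (fun p => token_start == p.1) then "B"
    else if mention_spans.any (fun p => token_end == p.2) then "E"
    else if mention_spans.any (fun p => decide (token_start > p.1) && decide (token_end < p.2)) then "I"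
    else "O"
  | _ => ""  -- Python raises ValueError (unpacking); excluded by Pre_

-- ===== PORT B =====
def label_iobes_py_alt (mention_spans : List (Int × Int)) (token_span : List Int) : String :=
  match token_span with
  | [] => ""       -- B also unpacks token_span; excluded by Pre_
  | [_] => ""
  | token_start :: token_end :: _ :: _ => ""
  | [token_start, token_end] =>
    let flags := mention_spans.foldl
      (fun (st : Bool × Bool × Bool × Bool) p =>
        (st.1 || (token_start == p.1 && token_end == p.2),
         st.2.1 || token_start == p.1,
         st.2.2.1 || token_end == p.2,
         st.2.2.2 || (decide (token_start > p.1) && decide (token_end < p.2))))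
      (false, false, false, false)
    if flags.1 then "S"
    else if flags.2.1 then "B"
    else if flags.2.2.1 then "E"
    else if flags.2.2.2 then "I"
    else "O"

-- ===== PRECONDITION & SPEC =====
-- Pre_ excludes token_span of length ≠ 2, on which A raises ValueError while unpacking.
def Pre_label_iobes_py (mention_spans : List (Int × Int)) (token_span : List Int) : Prop :=
  token_span.length = 2
instance (mention_spans : List (Int × Int)) (token_span : List Int) : Decidable (Pre_label_iobes_py mention_spans token_span) := by unfold Pre_label_iobes_py; infer_instance
def pvWitness_label_iobes_py : (List (Int × Int)) × List Int := ([(0, 3), (5, 7)], [5, 7])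
def Spec_label_iobes_py (mention_spans : List (Int × Int)) (token_span : List Int) (out : String) : Prop := out = label_iobes_py_alt mention_spans token_span
instance (mention_spans : List (Int × Int)) (token_span : List Int) (out : String) : Decidable (Spec_label_iobes_py mention_spans token_span out) := by unfold Spec_label_iobes_py; infer_instance

-- ===== CLAIM (what is proved, stated in full; the proofs are below) =====
def Claim_equal_label_iobes_py : Prop := ∀ (mention_spans : List (Int × Int)) (token_span : List Int), Dom_label_iobes_py mention_spans token_span → Pre_label_iobes_py mention_spans token_span → Spec_label_iobes_py mention_spans token_span (label_iobes_py mention_spans token_span)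

-- ===== LEMMAS AND PROOFS =====
theorem iobes_foldl_flags (ts te : Int) (l : List (Int × Int)) (s b e i : Bool) :
    l.foldl
      (fun (st : Bool × Bool × Bool × Bool) p =>
        (st.1 || (ts == p.1 && te == p.2),
         st.2.1 || ts == p.1,
         st.2.2.1 || te == p.2,
         st.2.2.2 || (decide (ts > p.1) && decide (te < p.2))))
      (s, b, e, i)
    = (s || l.any (fun p => ts == p.1 && te == p.2),
       b || l.any (fun p => ts == p.1),
       e || l.any (fun p => te == p.2),
       i || l.any (fun p => decide (ts > p.1) && decide (te < p.2))) := by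
  induction l generalizing s b e i with
  | nil => simp
  | cons hd tl ih =>
    simp only [List.foldl_cons, List.any_cons, ih]
    simp [Bool.or_assoc]

-- ===== VERDICT (by name: the statement is the Claim_ definition above) =====
theorem label_iobes_py_spec : Claim_equal_label_iobes_py := by
  intro ms ts _ hpre
  unfold Spec_label_iobes_py label_iobes_py label_iobes_py_alt
  match ts with
  | [a, b] =>
    simp only [iobes_foldl_flags, Bool.false_or]
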